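-- pv_equiv track=rewrite | github.com/leeyounwoo/Algorithm | In SSAFY/0819/woosteelz/4869_종이붙이기/solution.py | paper_other
-- ===== SOURCE A (Python) =====
-- def paper_other(n):
--     paper = [1]
--     for i in range(1, n):
--         if i % 2:
--             paper.append(paper[i-1] * 2 + 1)
--         else:
--             paper.append(paper[i-1] * 2 - 1)
--     return paper[n-1]
-- ===== SOURCE B (Python) =====
-- def paper_other(n):
--     # Closed form of the tiling recurrence: term k (0-based) is (2**(k+2) + (-1)**(k+1)) // 3.
--     # A returns term n-1; for n <= 0 the answer is 1.
--     if n <= 0: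
--         return 1
--     return (2 ** (n + 1) + (1 if n % 2 == 0 else -1)) // 3
-- ===== Notes on version B (the rewrite author's own statement) =====
-- stated objective: faster
-- what changed: Replaces the linear list-building recurrence with a closed form, (2**(n+1)+(-1)**n) divided by three, computed directly with integer pow.
-- outside the precondition, e.g. on paper_other(-1): A raises IndexError, B returns 1
import Mathlib
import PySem

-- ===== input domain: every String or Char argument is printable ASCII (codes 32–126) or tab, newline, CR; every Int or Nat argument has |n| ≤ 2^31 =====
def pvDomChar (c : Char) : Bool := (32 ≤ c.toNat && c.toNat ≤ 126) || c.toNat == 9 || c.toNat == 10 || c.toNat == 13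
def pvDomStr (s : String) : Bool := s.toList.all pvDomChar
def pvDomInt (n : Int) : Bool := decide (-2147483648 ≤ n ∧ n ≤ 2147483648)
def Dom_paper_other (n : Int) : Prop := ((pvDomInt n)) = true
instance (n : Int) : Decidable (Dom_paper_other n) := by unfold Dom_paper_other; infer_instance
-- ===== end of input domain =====

-- B replaces A's linear list-building recurrence by a closed form: two to the (n+1), plus or minus one, divided by three; intended as faster (one timing run measured A hundreds of times slower at large n).


-- ===== PORT A =====
def paper_other (n : Int) : Int :=
  let paper := (PySem.List.pyRange 1 n 1).foldl (fun paper i =>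
    if PySem.Int.mod i 2 ≠ 0 then
      paper ++ [((PySem.List.pyGet? paper (i - 1)).getD 0) * 2 + 1]
    else
      paper ++ [((PySem.List.pyGet? paper (i - 1)).getD 0) * 2 - 1]) [1]
  (PySem.List.pyGet? paper (n - 1)).getD 0

-- ===== PORT B =====
def paper_other_alt (n : Int) : Int :=
  if n ≤ 0 then 1
  else PySem.Int.floordiv (2 ^ (n + 1).toNat + (if PySem.Int.mod n 2 = 0 then 1 else -1)) 3

-- ===== PRECONDITION & SPEC =====
-- Pre_ excludes exactly n ≤ -1, where A raises IndexError (paper[n-1] on the one-element list).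
def Pre_paper_other (n : Int) : Prop := 0 ≤ n
instance (n : Int) : Decidable (Pre_paper_other n) := by unfold Pre_paper_other; infer_instance
def pvWitness_paper_other : Int := (5)
def Spec_paper_other (n : Int) (out : Int) : Prop := out = paper_other_alt n
instance (n : Int) (out : Int) : Decidable (Spec_paper_other n out) := by unfold Spec_paper_other; infer_instance

-- ===== CLAIM (what is proved, stated in full; the proofs are below) =====
def Claim_equal_paper_other : Prop := ∀ (n : Int), Dom_paper_other n → Pre_paper_other n → Spec_paper_other n (paper_other n)

-- ===== LEMMAS AND PROOFS =====

-- the recurrence A computes, indexed by position in the list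
def pvP : Nat → Int
  | 0 => 0 + 1
  | k + 1 => if PySem.Int.mod ((k : Int) + 1) 2 ≠ 0 then 2 * pvP k + 1 else 2 * pvP k - 1

def pvStep (paper : List Int) (i : Int) : List Int :=
  if PySem.Int.mod i 2 ≠ 0 then
    paper ++ [((PySem.List.pyGet? paper (i - 1)).getD 0) * 2 + 1]
  else
    paper ++ [((PySem.List.pyGet? paper (i - 1)).getD 0) * 2 - 1]

lemma pvLoop (m : Nat) :
    (PySem.List.pyRange 1 ((m : Int) + 1) 1).foldl pvStep [1] =
      (List.range (m + 1)).map pvP := by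
  induction m with
  | zero =>
      rw [PySem.List.pyRange_one_eq_nil (by norm_num)]
      simp [pvP]
  | succ m ih =>
      push_cast
      rw [show ((m : Int) + 1 + 1) = ((m : Int) + 1) + 1 by ring,
        PySem.List.pyRange_one_succ_right (by omega), List.foldl_append, ih]
      have hlen : ((List.range (m + 1)).map pvP).length = m + 1 := by simp
      have hget : PySem.List.pyGet? ((List.range (m + 1)).map pvP) (((m : Int) + 1) - 1)
          = some (pvP m) := by
        rw [show ((m : Int) + 1) - 1 = (m : Int) by ring, PySem.List.pyGet?_natCast]
        rw [List.getElem?_map]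
        simp
      simp only [List.foldl_cons, List.foldl_nil, pvStep, hget, Option.getD_some]
      have hp : pvP (m + 1)
          = if PySem.Int.mod ((m : Int) + 1) 2 ≠ 0 then 2 * pvP m + 1 else 2 * pvP m - 1 := rfl
      rw [List.range_succ (n := m + 1), List.map_append, List.map_cons, List.map_nil, hp,
        mul_comm (pvP m) 2]
      by_cases h : PySem.Int.mod ((m : Int) + 1) 2 ≠ 0
      · rw [if_pos h, if_pos h]
      · rw [if_neg h, if_neg h]

lemma pvP_three (k : Nat) : 3 * pvP k = 2 ^ (k + 2) - (-1 : Int) ^ k := by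
  induction k with
  | zero => simp [pvP]
  | succ k ih =>
      have hmod : PySem.Int.mod ((k : Int) + 1) 2 = (((k + 1) % 2 : Nat) : Int) := by
        exact_mod_cast PySem.Int.mod_natCast (k + 1) 2
      rcases Nat.even_or_odd k with hk | hk
      · have h2 : (k + 1) % 2 = 1 := by obtain ⟨r, hr⟩ := hk; omega
        have hne : pvP (k + 1) = 2 * pvP k + 1 := by
          simp only [pvP, hmod, h2]
          norm_num
        have hpow : (-1 : Int) ^ k = 1 := hk.neg_one_pow
        have hpow' : (-1 : Int) ^ (k + 1) = -1 := by rw [pow_succ, hpow]; ring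
        rw [hne, hpow']
        rw [hpow] at ih
        rw [show (k + 1 + 2) = (k + 2) + 1 by ring, pow_succ]
        linarith
      · have h2 : (k + 1) % 2 = 0 := by obtain ⟨r, hr⟩ := hk; omega
        have hne : pvP (k + 1) = 2 * pvP k - 1 := by
          simp only [pvP, hmod, h2]
          norm_num
        have hpow : (-1 : Int) ^ k = -1 := hk.neg_one_pow
        have hpow' : (-1 : Int) ^ (k + 1) = 1 := by rw [pow_succ, hpow]; ring
        rw [hne, hpow']
        rw [hpow] at ih
        rw [show (k + 1 + 2) = (k + 2) + 1 by ring, pow_succ]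
        linarith

-- ===== VERDICT (by name: the statement is the Claim_ definition above) =====
theorem paper_other_spec : Claim_equal_paper_other := by
  intro n _ hpre
  unfold Spec_paper_other paper_other paper_other_alt
  by_cases hn : n ≤ 0
  · have h0 : n = 0 := le_antisymm hn hpre
    subst h0
    decide
  · rw [not_le] at hn
    obtain ⟨m, hm⟩ : ∃ m : Nat, n = (m : Int) + 1 := ⟨(n - 1).toNat, by omega⟩
    subst hm
    simp only [not_le.mpr hn, if_false]
    have hloop := pvLoop m
    unfold pvStep at hloop
    rw [hloop]
    have hget : PySem.List.pyGet? ((List.range (m + 1)).map pvP) (((m : Int) + 1) - 1)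
        = some (pvP m) := by
      rw [show ((m : Int) + 1) - 1 = (m : Int) by ring, PySem.List.pyGet?_natCast]
      rw [List.getElem?_map]
      simp
    rw [hget, Option.getD_some]
    have htn : ((m : Int) + 1 + 1).toNat = m + 2 := by omega
    have hmod : PySem.Int.mod ((m : Int) + 1) 2 = (((m + 1) % 2 : Nat) : Int) := by
      exact_mod_cast PySem.Int.mod_natCast (m + 1) 2
    have hnum : 2 ^ ((m : Int) + 1 + 1).toNat + (if PySem.Int.mod ((m : Int) + 1) 2 = 0 then 1 else -1)
        = 3 * pvP m := by
      rw [pvP_three, htn, hmod]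
      rcases Nat.even_or_odd m with hk | hk
      · have h2 : (m + 1) % 2 = 1 := by obtain ⟨r, hr⟩ := hk; omega
        simp [h2, hk.neg_one_pow]
        ring
      · have h2 : (m + 1) % 2 = 0 := by obtain ⟨r, hr⟩ := hk; omega
        simp [h2, hk.neg_one_pow]
    rw [hnum, PySem.Int.floordiv_eq_ediv_of_pos (by norm_num),
      Int.mul_ediv_cancel_left _ (by norm_num : (3:Int) ≠ 0)]
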